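-- pv_equiv track=rewrite | github.com/4jamesccraven/advent-of-code-2023 | 5/solution1.py | cascading_search
-- ===== SOURCE A (Python) =====
-- from typing import List, Dict, Tuple
--
-- SeedMap = Dict[Tuple[str, str], List[Tuple[int, int, int]]]
--
-- def cascading_search(starting_val: int,
--                      seed_map: SeedMap,
--                      source_type: str = 'seed') -> int:
--     '''
--     Searches recursively through a seed map to find a location value
--     '''
--     if source_type == 'location':
--         return starting_val
--
--     # Find the next applicable mapping and note its return type
--     mapping = next(filter(lambda x: x[0] == source_type, seed_map))
--     result_type = mapping[1]
--     mapping = seed_map[mapping]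
--
--     # Appropriately map starting_val and then search the next map
--     for dest, source, length in mapping:
--         valid_upper = source + length
--         if starting_val >= source and starting_val < valid_upper:
--             return cascading_search(dest + (starting_val - source),
--                                     seed_map, result_type)
--     else:
--         return cascading_search(starting_val, seed_map, result_type)
-- ===== SOURCE B (Python) =====
-- def cascading_search(starting_val, seed_map, source_type='seed'):
--     # First-wins index: source type -> (result type, ranges); built once,
--     # replaces A's per-stage linear scan with a dict lookup.
--     index = {}
--     for (src, dst), ranges in seed_map.items():
--         index.setdefault(src, (dst, ranges))
--     val, typ = starting_val, source_type
--     while typ != 'location':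
--         dst, ranges = index[typ]
--         val = next((d + (val - s) for d, s, l in ranges if s <= val < s + l), val)
--         typ = dst
--     return val
-- ===== Notes on version B (the rewrite author's own statement) =====
-- stated objective: alternative
-- what changed: Replaced the tail recursion with an explicit while loop over stages, a first-wins dict index built once instead of a linear filter scan per stage, and a generator-with-default instead of the for/else range scan.
import Mathlib
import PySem

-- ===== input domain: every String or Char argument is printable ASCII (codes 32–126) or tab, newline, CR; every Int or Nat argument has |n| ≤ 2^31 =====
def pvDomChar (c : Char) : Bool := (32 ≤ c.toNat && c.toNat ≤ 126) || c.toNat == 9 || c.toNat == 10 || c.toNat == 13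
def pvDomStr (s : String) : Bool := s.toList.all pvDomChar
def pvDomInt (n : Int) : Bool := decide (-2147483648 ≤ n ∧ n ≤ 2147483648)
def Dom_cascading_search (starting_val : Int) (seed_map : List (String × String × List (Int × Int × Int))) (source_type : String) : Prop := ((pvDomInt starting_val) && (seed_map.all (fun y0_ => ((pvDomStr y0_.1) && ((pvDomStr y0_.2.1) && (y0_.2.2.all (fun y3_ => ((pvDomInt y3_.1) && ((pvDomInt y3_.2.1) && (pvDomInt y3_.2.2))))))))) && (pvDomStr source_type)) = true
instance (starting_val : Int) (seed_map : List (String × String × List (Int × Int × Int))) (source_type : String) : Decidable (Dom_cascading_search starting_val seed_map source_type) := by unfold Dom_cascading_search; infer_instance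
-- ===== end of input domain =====

-- ===== PORT A =====
-- B rewrites A's tail recursion as a while loop over a first-wins index built once;
-- equal return values on Pre_ (inputs where Python A returns normally): objective "alternative".
-- Fuel (seed_map.length + 1) bounds the stage chain: a terminating Python run visits
-- pairwise-distinct source types, each owning a distinct entry, so it never runs out under Pre_.
mutual
def cascading_searchA (fuel : Nat) (v : Int) (m : List (String × String × List (Int × Int × Int))) (t : String) : Int :=
  match fuel with
  | 0 => v    -- unreachable under Pre_ (Python would raise RecursionError before this bound)
  | f+1 =>
    if t == "location" then v
    else
      match m.find? (fun x => x.1 == t) with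
      | none => v    -- Python raises StopIteration here; excluded by Pre_
      | some e => rangesLoopA f v m e.2.1 e.2.2
termination_by (fuel, 0)

def rangesLoopA (f : Nat) (v : Int) (m : List (String × String × List (Int × Int × Int))) (rt : String) (rs : List (Int × Int × Int)) : Int :=
  match rs with
  | [] => cascading_searchA f v m rt
  | (d, s, l) :: rest =>
    if v ≥ s && v < s + l then cascading_searchA f (d + (v - s)) m rt
    else rangesLoopA f v m rt rest
termination_by (f, rs.length + 1)
end

def cascading_search (starting_val : Int) (seed_map : List (String × String × List (Int × Int × Int))) (source_type : String) : Int :=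
  cascading_searchA (seed_map.length + 1) starting_val seed_map source_type

-- ===== PORT B =====
-- index.setdefault: keep the first entry for each source type
def buildIndexB (m : List (String × String × List (Int × Int × Int))) : List (String × String × List (Int × Int × Int)) :=
  m.foldl (fun acc e => if acc.any (fun x => x.1 == e.1) then acc else acc ++ [e]) []

-- the while loop, with the same fuel bound making it total
def altLoopB (index : List (String × String × List (Int × Int × Int))) (fuel : Nat) (v : Int) (t : String) : Int :=
  match fuel with
  | 0 => v    -- unreachable under Pre_
  | f+1 =>
    if t == "location" then v
    else
      match index.find? (fun x => x.1 == t) with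
      | none => v    -- Python raises KeyError here; excluded by Pre_
      | some e =>
        let v' := (e.2.2.find? (fun r => decide (r.2.1 ≤ v ∧ v < r.2.1 + r.2.2))).elim v (fun r => r.1 + (v - r.2.1))
        altLoopB index f v' e.2.1

def cascading_search_alt (starting_val : Int) (seed_map : List (String × String × List (Int × Int × Int))) (source_type : String) : Int :=
  altLoopB (buildIndexB seed_map) (seed_map.length + 1) starting_val source_type

-- ===== PRECONDITION & SPEC =====
-- the successor of a stage name in the input's key graph: the result type of the first
-- entry whose source type matches (a stage with no entry is its own successor)
def nextStage (m : List (String × String × List (Int × Int × Int))) (t : String) : String :=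
  if t == "location" then t
  else match m.find? (fun x => x.1 == t) with
       | some e => e.2.1
       | none => t

-- Pre_: exactly the inputs on which Python A returns normally. A follows the stage-successor
-- map of the input's keys until "location"; it returns iff that walk reaches "location"
-- (otherwise it raises StopIteration at a missing stage or RecursionError on a cycle).
-- A successful walk visits pairwise-distinct stages, so it reaches "location" within
-- seed_map.length applications of the successor map, and "location" is a fixed point;
-- hence the closed form: iterating the successor map seed_map.length times from
-- source_type lands on "location".
def Pre_cascading_search (_starting_val : Int) (seed_map : List (String × String × List (Int × Int × Int))) (source_type : String) : Prop :=
  (nextStage seed_map)^[seed_map.length] source_type = "location"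
instance (starting_val : Int) (seed_map : List (String × String × List (Int × Int × Int))) (source_type : String) : Decidable (Pre_cascading_search starting_val seed_map source_type) := by unfold Pre_cascading_search; infer_instance

def pvWitness_cascading_search : Int × (List (String × String × List (Int × Int × Int))) × String :=
  (5, [("seed", "soil", [(10, 3, 4)]), ("soil", "location", [(0, 100, 5)])], "seed")

def Spec_cascading_search (starting_val : Int) (seed_map : List (String × String × List (Int × Int × Int))) (source_type : String) (out : Int) : Prop := out = cascading_search_alt starting_val seed_map source_type
instance (starting_val : Int) (seed_map : List (String × String × List (Int × Int × Int))) (source_type : String) (out : Int) : Decidable (Spec_cascading_search starting_val seed_map source_type out) := by unfold Spec_cascading_search; infer_instance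

-- ===== CLAIM (what is proved, stated in full; the proofs are below) =====
def Claim_equal_cascading_search : Prop := ∀ (starting_val : Int) (seed_map : List (String × String × List (Int × Int × Int))) (source_type : String), Dom_cascading_search starting_val seed_map source_type → Pre_cascading_search starting_val seed_map source_type → Spec_cascading_search starting_val seed_map source_type (cascading_search starting_val seed_map source_type)

-- ===== LEMMAS AND PROOFS =====

-- lookup by source type in the first-wins index = first match in the original list
theorem find?_buildIndex_go (t : String)
    (m acc : List (String × String × List (Int × Int × Int))) :
    (m.foldl (fun acc e => if acc.any (fun x => x.1 == e.1) then acc else acc ++ [e]) acc).find?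
        (fun x => x.1 == t)
      = ((acc.find? (fun x => x.1 == t)).or (m.find? (fun x => x.1 == t))) := by
  induction m generalizing acc with
  | nil => simp
  | cons e m ih =>
    simp only [List.foldl_cons]
    by_cases h : acc.any (fun x => x.1 == e.1) = true
    · rw [if_pos h, ih]
      by_cases hpe : e.1 = t
      · rcases List.any_eq_true.mp h with ⟨a, ha, hae⟩
        have hat : (a.1 == t) = true := by
          subst hpe; exact hae
        have hsome : (acc.find? (fun x => x.1 == t)).isSome := by
          rw [List.find?_isSome]; exact ⟨a, ha, hat⟩
        rcases Option.isSome_iff_exists.mp hsome with ⟨w, hw⟩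
        simp [hw]
      · simp [hpe]
    · rw [if_neg h, ih, List.find?_append]
      by_cases hpe : e.1 = t
      · have hnone : acc.find? (fun x => x.1 == t) = none := by
          rw [List.find?_eq_none]
          intro a ha hpa
          apply h
          rw [List.any_eq_true]
          refine ⟨a, ha, ?_⟩
          have : a.1 = t := by simpa using hpa
          simp [this, hpe]
        simp [hnone, hpe]
      · simp [hpe]

theorem find?_buildIndex (t : String) (m : List (String × String × List (Int × Int × Int))) :
    (buildIndexB m).find? (fun x => x.1 == t) = m.find? (fun x => x.1 == t) := by
  unfold buildIndexB
  rw [find?_buildIndex_go]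
  simp

-- A's range loop computes the same new value as B's find?-with-default, then recurses
theorem rangesLoopA_eq (f : Nat) (m : List (String × String × List (Int × Int × Int)))
    (rt : String) (rs : List (Int × Int × Int)) (v : Int) :
    rangesLoopA f v m rt rs
      = cascading_searchA f
          ((rs.find? (fun r => decide (r.2.1 ≤ v ∧ v < r.2.1 + r.2.2))).elim v
            (fun r => r.1 + (v - r.2.1))) m rt := by
  induction rs with
  | nil => simp [rangesLoopA]
  | cons r rest ih =>
    obtain ⟨d, s, l⟩ := r
    rw [rangesLoopA]
    by_cases hc : s ≤ v ∧ v < s + l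
    · rw [if_pos (by simp [hc.1, hc.2, ge_iff_le])]
      simp [hc]
    · rw [if_neg (by simpa [ge_iff_le, Decidable.not_and_iff_not_or_not] using hc)]
      rw [ih]
      simp [hc]

-- the two fueled programs agree on every input (same fuel)
theorem loops_eq (m : List (String × String × List (Int × Int × Int))) (fuel : Nat)
    (v : Int) (t : String) :
    cascading_searchA fuel v m t = altLoopB (buildIndexB m) fuel v t := by
  induction fuel generalizing v t with
  | zero => rw [cascading_searchA, altLoopB]
  | succ f ih =>
    rw [cascading_searchA, altLoopB]
    by_cases ht : (t == "location") = true
    · simp [ht]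
    · simp only [ht, if_false, Bool.false_eq_true]
      rw [find?_buildIndex]
      cases hfind : m.find? (fun x => x.1 == t) with
      | none => rfl
      | some e => show rangesLoopA f v m e.2.1 e.2.2 = _; rw [rangesLoopA_eq, ih]

-- ===== VERDICT (by name: the statement is the Claim_ definition above) =====
theorem cascading_search_spec : Claim_equal_cascading_search := by
  intro v m t _ _
  unfold Spec_cascading_search cascading_search cascading_search_alt
  exact loops_eq m (m.length + 1) v t
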